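-- pv_equiv track=rewrite | github.com/JiayangWu/LeetCode-Python | LeetCode-Python/LCP 66.最小展台数量/LCP 66-最小展台数量.py | minNumBooths
-- ===== SOURCE A (Python) =====
-- from typing import List
--
-- def minNumBooths(demands: List[str]) -> int:
--     from collections import defaultdict, Counter
--     char2count = defaultdict(int)
--     for demand in demands:
--         c = Counter(demand)
--
--         for char, freq in c.items():
--             char2count[char] = max(char2count[char], freq)
--
--     return sum(freq for freq in char2count.values())
-- ===== SOURCE B (Python) =====
-- def minNumBooths(demands):
--     # Character-major two-phase computation: collect distinct characters in
--     # order of first occurrence, then take the max per-demand count of each.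
--     chars = []
--     for d in demands:
--         for ch in d:
--             if ch not in chars:
--                 chars.append(ch)
--     return sum(max((d.count(ch) for d in demands), default=0) for ch in chars)
-- ===== Notes on version B (the rewrite author's own statement) =====
-- stated objective: alternative
-- what changed: Transposes A's demand-major single pass that maintains a dict of running per-character maxima into a two-phase character-major computation: first collect the distinct characters in order of first occurrence, then sum max(d.count(ch) for d in demands) over each distinct character.
import Mathlib
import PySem

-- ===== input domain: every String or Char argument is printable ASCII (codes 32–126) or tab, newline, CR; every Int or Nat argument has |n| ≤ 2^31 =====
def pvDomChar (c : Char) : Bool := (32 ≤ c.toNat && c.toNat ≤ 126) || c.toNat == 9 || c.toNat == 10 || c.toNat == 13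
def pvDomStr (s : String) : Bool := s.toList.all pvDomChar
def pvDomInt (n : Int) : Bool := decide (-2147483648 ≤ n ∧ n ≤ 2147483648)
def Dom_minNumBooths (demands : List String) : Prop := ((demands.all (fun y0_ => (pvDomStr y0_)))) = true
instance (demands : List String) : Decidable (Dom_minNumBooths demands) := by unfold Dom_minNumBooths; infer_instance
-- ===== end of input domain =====

-- B replaces A's demand-major dict of running maxima with a two-phase character-major
-- computation (distinct characters first, then a max of per-demand counts per character);
-- same cost class, alternative decomposition.


-- ===== PORT A =====
-- one iteration of A's outer loop: fold Counter(demand).items() into char2count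
-- (defaultdict read-then-assign of max(char2count[char], freq) is getD + insert)
def aStep (cc : PySem.Dict Char Int) (demand : String) : PySem.Dict Char Int :=
  (PySem.Dict.counter demand.toList).items.foldl
    (fun cc p => cc.insert p.1 (max (cc.getD p.1 0) p.2)) cc

def minNumBooths (demands : List String) : Int :=
  (demands.foldl aStep PySem.Dict.empty).values.sum

-- ===== PORT B =====
-- phase 1 of Source B: the distinct characters, in order of first occurrence
def bStep (cs : List Char) (d : String) : List Char :=
  d.toList.foldl (fun cs ch => if ch ∈ cs then cs else cs ++ [ch]) cs

def bChars (demands : List String) : List Char :=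
  demands.foldl bStep []

-- phase 2 of Source B: max(d.count(ch) for d in demands, default=0); Python's str.count
-- with a 1-character needle is exactly the character count, so List.count is exact here
def bMax (demands : List String) (ch : Char) : Int :=
  PySem.List.maxD (demands.map (fun d => (d.toList.count ch : Int))) (fun x => x) 0

def minNumBooths_alt (demands : List String) : Int :=
  ((bChars demands).map (bMax demands)).sum

-- ===== PRECONDITION & SPEC =====
def Spec_minNumBooths (demands : List String) (out : Int) : Prop := out = minNumBooths_alt demands
instance (demands : List String) (out : Int) : Decidable (Spec_minNumBooths demands out) := by unfold Spec_minNumBooths; infer_instance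

-- ===== CLAIM (what is proved, stated in full; the proofs are below) =====
def Claim_equal_minNumBooths : Prop := ∀ (demands : List String), Dom_minNumBooths demands → Spec_minNumBooths demands (minNumBooths demands)

-- ===== LEMMAS AND PROOFS =====

-- the inner fold of aStep, on the shape items_counter gives it
theorem inner_getD (g : Char → Int) (v : Char) :
    ∀ (ks : List Char), ks.Nodup → ∀ (cc : PySem.Dict Char Int),
    ((ks.map (fun k => (k, g k))).foldl
        (fun cc p => cc.insert p.1 (max (cc.getD p.1 0) p.2)) cc).getD v 0
      = if v ∈ ks then max (cc.getD v 0) (g v) else cc.getD v 0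
  | [], _, cc => by simp
  | k :: ks, hnd, cc => by
    simp only [List.map_cons, List.foldl_cons]
    rw [inner_getD g v ks hnd.of_cons]
    by_cases hv : v = k
    · subst hv
      have hvks : v ∉ ks := by simpa using (List.nodup_cons.mp hnd).1
      simp [hvks, PySem.Dict.getD_insert_self]
    · by_cases hv2 : v ∈ ks <;>
        simp [hv, hv2, PySem.Dict.getD_insert]

theorem aStep_getD (cc : PySem.Dict Char Int) (demand : String) (v : Char)
    (h : 0 ≤ cc.getD v 0) :
    (aStep cc demand).getD v 0 = max (cc.getD v 0) (demand.toList.count v : Int) := by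
  unfold aStep
  rw [PySem.Dict.items_counter,
      inner_getD _ _ _ (PySem.Set.nodup_ofList _)]
  by_cases hv : v ∈ PySem.Set.ofList demand.toList
  · simp [hv]
  · have hv' : v ∉ demand.toList := by
      intro hm; exact hv ((PySem.Set.mem_ofList _ _).mpr hm)
    simp [hv, List.count_eq_zero.mpr hv', max_eq_left h]

theorem aFold_getD (ds : List String) (cc : PySem.Dict Char Int) (v : Char)
    (h : 0 ≤ cc.getD v 0) :
    (ds.foldl aStep cc).getD v 0
      = (ds.map (fun d => (d.toList.count v : Int))).foldl max (cc.getD v 0) := by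
  induction ds generalizing cc with
  | nil => simp
  | cons d ds ih =>
    simp only [List.foldl_cons, List.map_cons]
    rw [ih _ (by rw [aStep_getD cc d v h]; exact le_max_of_le_left h),
        aStep_getD cc d v h]

theorem aStep_keys (cc : PySem.Dict Char Int) (demand : String) :
    (aStep cc demand).keys = PySem.Set.update cc.keys (PySem.Set.ofList demand.toList) := by
  unfold aStep
  rw [PySem.Dict.items_counter]
  have := PySem.Dict.keys_foldl_insert_key
    ((PySem.Set.ofList demand.toList).map (fun k => (k, (demand.toList.count k : Int))))
    Prod.fst (fun cc p => max (cc.getD p.1 0) p.2) cc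
  simpa [Function.comp_def] using this

theorem aFold_keys_nodup (ds : List String) (cc : PySem.Dict Char Int)
    (h : cc.keys.Nodup) : (ds.foldl aStep cc).keys.Nodup := by
  induction ds generalizing cc with
  | nil => exact h
  | cons d ds ih =>
    exact ih _ (by rw [aStep_keys]; exact PySem.Set.nodup_update _ _ h)

theorem aFold_keys_mem (ds : List String) (cc : PySem.Dict Char Int) (v : Char) :
    v ∈ (ds.foldl aStep cc).keys ↔ v ∈ cc.keys ∨ ∃ d ∈ ds, v ∈ d.toList := by
  induction ds generalizing cc with
  | nil => simp
  | cons d ds ih =>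
    simp only [List.foldl_cons]
    rw [ih]
    constructor
    · rintro (hm | hm)
      · rw [aStep_keys] at hm
        rcases (PySem.Set.mem_update _ _ _).mp hm with hm | hm
        · exact Or.inl hm
        · exact Or.inr ⟨d, by simp, (PySem.Set.mem_ofList _ _).mp hm⟩
      · obtain ⟨e, he, hv⟩ := hm
        exact Or.inr ⟨e, by simp [he], hv⟩
    · rintro (hm | ⟨e, he, hv⟩)
      · exact Or.inl (by rw [aStep_keys]; exact (PySem.Set.mem_update _ _ _).mpr (Or.inl hm))
      · rcases List.mem_cons.mp he with rfl | he'
        · exact Or.inl (by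
            rw [aStep_keys]
            exact (PySem.Set.mem_update _ _ _).mpr (Or.inr ((PySem.Set.mem_ofList _ _).mpr hv)))
        · exact Or.inr ⟨e, he', hv⟩

-- Source B's membership-guarded append is PySem.Set.add; phase 1 is a Set.update per demand
theorem bStep_eq_update (cs : PySem.Set Char) (d : String) :
    bStep cs d = PySem.Set.update cs d.toList := by
  have hf : (fun (cs : List Char) ch => if ch ∈ cs then cs else cs ++ [ch])
      = PySem.Set.add := by
    funext s ch
    by_cases h : ch ∈ s <;> simp [PySem.Set.add, PySem.Set.contains, h]
  unfold bStep PySem.Set.update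
  rw [hf]

theorem bChars_fold_mem (ds : List String) (cs : PySem.Set Char) (v : Char) :
    v ∈ ds.foldl bStep cs ↔ v ∈ cs ∨ ∃ d ∈ ds, v ∈ d.toList := by
  induction ds generalizing cs with
  | nil => simp
  | cons d ds ih =>
    simp only [List.foldl_cons]
    rw [ih, bStep_eq_update]
    constructor
    · rintro (hm | hm)
      · rcases (PySem.Set.mem_update _ _ _).mp hm with hm | hm
        · exact Or.inl hm
        · exact Or.inr ⟨d, by simp, hm⟩
      · obtain ⟨e, he, hv⟩ := hm
        exact Or.inr ⟨e, by simp [he], hv⟩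
    · rintro (hm | ⟨e, he, hv⟩)
      · exact Or.inl ((PySem.Set.mem_update _ _ _).mpr (Or.inl hm))
      · rcases List.mem_cons.mp he with rfl | he'
        · exact Or.inl ((PySem.Set.mem_update _ _ _).mpr (Or.inr hv))
        · exact Or.inr ⟨e, he', hv⟩

theorem bChars_fold_nodup (ds : List String) (cs : PySem.Set Char) (h : cs.Nodup) :
    (ds.foldl bStep cs).Nodup := by
  induction ds generalizing cs with
  | nil => exact h
  | cons d ds ih =>
    exact ih _ (by rw [bStep_eq_update]; exact PySem.Set.nodup_update _ _ h)

-- sum of a dict's values as a sum over its (nodup) keys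
theorem values_sum (l : List (Char × Int)) (hnd : (l.map Prod.fst).Nodup) :
    (l.map Prod.snd).sum
      = ((l.map Prod.fst).map (fun k => (PySem.Dict.mk l).getD k 0)).sum := by
  induction l with
  | nil => simp
  | cons p l ih =>
    obtain ⟨k, v⟩ := p
    have hk : k ∉ l.map Prod.fst := by simpa using (List.nodup_cons.mp hnd).1
    simp only [List.map_cons, List.sum_cons]
    rw [ih hnd.of_cons]
    congr 1
    · simp [PySem.Dict.getD, PySem.Dict.get?_mk_cons]
    · apply congrArg
      apply List.map_congr_left
      intro k' hk'
      have hne : (k == k') = false := by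
        simp only [beq_eq_false_iff_ne]; rintro rfl; exact hk hk'
      simp [PySem.Dict.getD, PySem.Dict.get?_mk_cons, hne]

-- per-character agreement: A's final dict value at any char is Source B's max-of-counts
theorem per_char (demands : List String) (d0 : String) (hd0 : d0 ∈ demands) (v : Char) :
    (demands.foldl aStep PySem.Dict.empty).getD v 0 = bMax demands v := by
  have hemp : (PySem.Dict.empty : PySem.Dict Char Int).getD v 0 = 0 := by
    simp [PySem.Dict.getD, PySem.Dict.get?, PySem.Dict.empty]
  rw [aFold_getD demands PySem.Dict.empty v (le_of_eq hemp.symm), hemp]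
  obtain ⟨e, ds, rfl⟩ : ∃ e ds, demands = e :: ds := by
    cases demands with
    | nil => cases hd0
    | cons e ds => exact ⟨e, ds, rfl⟩
  unfold bMax
  rw [List.map_cons, PySem.List.maxD, PySem.List.max?_id_cons]
  simp

-- ===== VERDICT (by name: the statement is the Claim_ definition above) =====
theorem minNumBooths_spec : Claim_equal_minNumBooths := by
  intro demands _
  unfold Spec_minNumBooths minNumBooths minNumBooths_alt
  set D := demands.foldl aStep PySem.Dict.empty with hD
  have hkeysnd : D.keys.Nodup := aFold_keys_nodup demands PySem.Dict.empty (by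
    simp [PySem.Dict.keys, PySem.Dict.empty])
  -- A's sum over values = sum over keys of getD
  have h1 : D.values.sum = (D.keys.map (fun k => D.getD k 0)).sum := by
    have := values_sum D.items (by simpa [PySem.Dict.keys] using hkeysnd)
    simpa [PySem.Dict.keys, PySem.Dict.values] using this
  -- keys and bChars are permutations of each other
  have hperm : D.keys.Perm (bChars demands) := by
    unfold bChars
    rw [List.perm_ext_iff_of_nodup hkeysnd
      (bChars_fold_nodup demands [] List.nodup_nil)]
    intro a
    rw [hD, aFold_keys_mem, bChars_fold_mem]
    simp [PySem.Dict.keys, PySem.Dict.empty]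
  have h2 : (D.keys.map (fun k => D.getD k 0)).sum
      = ((bChars demands).map (fun k => D.getD k 0)).sum :=
    (hperm.map _).sum_eq
  have h3 : ((bChars demands).map (fun k => D.getD k 0))
      = (bChars demands).map (bMax demands) := by
    apply List.map_congr_left
    intro k hk
    unfold bChars at hk
    have := (bChars_fold_mem demands [] k).mp hk
    obtain ⟨d0, hd0, _⟩ := by simpa using this
    exact per_char demands d0 hd0 k
  rw [h1, h2, h3]
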